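-- pv_equiv track=rewrite | github.com/flowstyleliving/su-firewall | scripts/truthfulqa_generation_evaluation.py | check_factual_accuracy
-- ===== SOURCE A (Python) =====
-- from typing import Dict, List, Optional
--
-- def check_factual_accuracy(generated_response: str, correct_answers: List[str],
--                          incorrect_answers: List[str]) -> bool:
--     """Check if generated response aligns with correct answers or incorrect answers."""
--
--     generated_lower = generated_response.lower().strip()
--
--     # Check for key phrases in correct answers
--     correct_score = 0
--     for correct_answer in correct_answers:
--         if isinstance(correct_answer, str):
--             correct_lower = correct_answer.lower()
--             # Look for key words/phrases
--             words = correct_lower.split()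
--             for word in words:
--                 if len(word) > 3 and word in generated_lower:  # Skip short words
--                     correct_score += 1
--
--     # Check for key phrases in incorrect answers
--     incorrect_score = 0
--     for incorrect_answer in incorrect_answers:
--         if isinstance(incorrect_answer, str):
--             incorrect_lower = incorrect_answer.lower()
--             words = incorrect_lower.split()
--             for word in words:
--                 if len(word) > 3 and word in generated_lower:
--                     incorrect_score += 1
--
--     # Simple heuristic: more overlap with correct answers = factually correct
--     return correct_score > incorrect_score
-- ===== SOURCE B (Python) =====
-- def check_factual_accuracy(generated_response, correct_answers, incorrect_answers):
--     """Dedup-and-weight strategy: test each DISTINCT long answer word against the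
--     response once, weighting it by how often it occurs on each side."""
--     text = generated_response.lower().strip()
--
--     def long_words(answers):
--         return [w for a in answers if isinstance(a, str)
--                 for w in a.lower().split() if len(w) > 3]
--
--     cw = long_words(correct_answers)
--     iw = long_words(incorrect_answers)
--     candidates = [w for w in dict.fromkeys(cw + iw) if w in text]
--     return sum(cw.count(w) - iw.count(w) for w in candidates) > 0
-- ===== Notes on version B (the rewrite author's own statement) =====
-- stated objective: alternative
-- what changed: A accumulates a score with a per-occurrence substring test inside two nested loops; B collects the long words of each side, deduplicates them (dict.fromkeys), performs ONE substring test per distinct word and sums the signed multiplicities count_correct - count_incorrect, comparing the net sum with 0.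
import Mathlib
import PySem

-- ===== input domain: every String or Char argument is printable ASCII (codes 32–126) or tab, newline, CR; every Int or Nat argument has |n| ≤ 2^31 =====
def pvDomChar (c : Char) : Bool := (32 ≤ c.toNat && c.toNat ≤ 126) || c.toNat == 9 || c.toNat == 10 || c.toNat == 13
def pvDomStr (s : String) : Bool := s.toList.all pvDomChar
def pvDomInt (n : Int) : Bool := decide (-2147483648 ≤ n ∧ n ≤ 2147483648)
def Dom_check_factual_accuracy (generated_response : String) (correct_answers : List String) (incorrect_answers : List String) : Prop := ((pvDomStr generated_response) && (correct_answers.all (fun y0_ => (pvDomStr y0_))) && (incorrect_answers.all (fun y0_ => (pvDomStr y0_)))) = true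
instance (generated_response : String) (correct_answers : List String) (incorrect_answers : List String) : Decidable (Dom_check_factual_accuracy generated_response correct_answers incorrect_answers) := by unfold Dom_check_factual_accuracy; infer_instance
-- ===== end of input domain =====

-- B replaces A's per-occurrence substring test by one test per DISTINCT long answer word,
-- weighted by its signed multiplicity (objective: alternative).

-- ===== PORT A =====
-- literal transliteration of A: two nested accumulation loops, one per answer list
def check_factual_accuracy (generated_response : String) (correct_answers : List String) (incorrect_answers : List String) : Bool :=
  let generated_lower := PySem.Str.strip (PySem.Str.lower generated_response)
  let correct_score : Int := correct_answers.foldl (fun score ans =>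
      (PySem.Str.split₀ (PySem.Str.lower ans)).foldl (fun sc w =>
        if decide (3 < PySem.Str.len w) && PySem.Str.isIn w generated_lower then sc + 1 else sc) score) 0
  let incorrect_score : Int := incorrect_answers.foldl (fun score ans =>
      (PySem.Str.split₀ (PySem.Str.lower ans)).foldl (fun sc w =>
        if decide (3 < PySem.Str.len w) && PySem.Str.isIn w generated_lower then sc + 1 else sc) score) 0
  decide (incorrect_score < correct_score)

-- ===== PORT B =====
-- Source B's long_words: all long (len > 3) words of the lowered answers, in order
def cfaLongWords (answers : List String) : List String :=
  answers.flatMap (fun a => (PySem.Str.split₀ (PySem.Str.lower a)).filter (fun w => decide (3 < PySem.Str.len w)))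

-- transliteration of Source B: dedup (dict.fromkeys = PySem.List.dedup), one substring test per distinct word, signed counts
def check_factual_accuracy_alt (generated_response : String) (correct_answers : List String) (incorrect_answers : List String) : Bool :=
  let text := PySem.Str.strip (PySem.Str.lower generated_response)
  let cw := cfaLongWords correct_answers
  let iw := cfaLongWords incorrect_answers
  let candidates := (PySem.List.dedup (cw ++ iw)).filter (fun w => PySem.Str.isIn w text)
  decide (0 < (candidates.map (fun w => (cw.count w : Int) - (iw.count w : Int))).sum)

-- ===== PRECONDITION & SPEC =====
def Spec_check_factual_accuracy (generated_response : String) (correct_answers : List String) (incorrect_answers : List String) (out : Bool) : Prop := out = check_factual_accuracy_alt generated_response correct_answers incorrect_answers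
instance (generated_response : String) (correct_answers : List String) (incorrect_answers : List String) (out : Bool) : Decidable (Spec_check_factual_accuracy generated_response correct_answers incorrect_answers out) := by unfold Spec_check_factual_accuracy; infer_instance

-- ===== CLAIM (what is proved, stated in full; the proofs are below) =====
def Claim_equal_check_factual_accuracy : Prop := ∀ (generated_response : String) (correct_answers : List String) (incorrect_answers : List String), Dom_check_factual_accuracy generated_response correct_answers incorrect_answers → Spec_check_factual_accuracy generated_response correct_answers incorrect_answers (check_factual_accuracy generated_response correct_answers incorrect_answers)

-- ===== LEMMAS AND PROOFS =====

-- A's inner loop counts the long words of one answer that occur in the text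
lemma cfa_inner_eq (text : String) (l : List String) (init : Int) :
    l.foldl (fun sc w =>
        if decide (3 < PySem.Str.len w) && PySem.Str.isIn w text then sc + 1 else sc) init
    = init + (((l.filter (fun w => decide (3 < PySem.Str.len w))).countP
        (fun w => PySem.Str.isIn w text) : Nat) : Int) := by
  induction l generalizing init with
  | nil => simp
  | cons x xs ih =>
    rw [List.foldl_cons]
    by_cases h3 : 3 < PySem.Str.len x
    · have h3' : decide (3 < PySem.Str.len x) = true := decide_eq_true h3
      have hf : (x :: xs).filter (fun w => decide (3 < PySem.Str.len w))
          = x :: xs.filter (fun w => decide (3 < PySem.Str.len w)) :=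
        List.filter_cons_of_pos h3'
      by_cases hin : PySem.Str.isIn x text = true
      · have hc : (decide (3 < PySem.Str.len x) && PySem.Str.isIn x text) = true := by
          rw [h3', hin]; rfl
        rw [if_pos hc, ih, hf, List.countP_cons, hin, if_pos rfl]
        omega
      · have hin' : PySem.Str.isIn x text = false := Bool.of_not_eq_true hin
        have hc : ¬ (decide (3 < PySem.Str.len x) && PySem.Str.isIn x text) = true := by
          rw [h3', Bool.true_and, hin']; exact Bool.false_ne_true
        rw [if_neg hc, ih, hf, List.countP_cons, hin', if_neg Bool.false_ne_true]
        omega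
    · have h3' : decide (3 < PySem.Str.len x) = false := decide_eq_false h3
      have hf : (x :: xs).filter (fun w => decide (3 < PySem.Str.len w))
          = xs.filter (fun w => decide (3 < PySem.Str.len w)) :=
        List.filter_cons_of_neg (by rw [h3']; exact Bool.false_ne_true)
      have hc : ¬ (decide (3 < PySem.Str.len x) && PySem.Str.isIn x text) = true := by
        rw [h3', Bool.false_and]; exact Bool.false_ne_true
      rw [if_neg hc, ih, hf]

-- A's outer loop over an answer list = count of matching long words of the whole list
lemma cfa_score_eq (text : String) (answers : List String) (init : Int) :
    answers.foldl (fun score ans =>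
        (PySem.Str.split₀ (PySem.Str.lower ans)).foldl (fun sc w =>
          if decide (3 < PySem.Str.len w) && PySem.Str.isIn w text then sc + 1 else sc) score) init
    = init + (((cfaLongWords answers).countP (fun w => PySem.Str.isIn w text) : Nat) : Int) := by
  induction answers generalizing init with
  | nil => simp [cfaLongWords]
  | cons a as ih =>
    rw [List.foldl_cons, cfa_inner_eq, ih]
    simp only [cfaLongWords, List.flatMap_cons, List.countP_append]
    push_cast
    ring

-- sum over a nodup list of the indicator of one of its members is 1
lemma cfa_ind_sum (d : List String) (x : String) (hnd : d.Nodup) (hx : x ∈ d) :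
    (d.map (fun w => if w = x then (1 : Int) else 0)).sum = 1 := by
  induction d with
  | nil => simp at hx
  | cons y d ih =>
    rcases List.nodup_cons.mp hnd with ⟨hy, hnd'⟩
    rcases List.mem_cons.mp hx with h | h
    · subst h
      have hz : ((d.map (fun w => if w = x then (1 : Int) else 0)).sum) = 0 := by
        apply List.sum_eq_zero
        intro v hv
        rcases List.mem_map.mp hv with ⟨w, hw, rfl⟩
        have hne : ¬ w = x := fun he => hy (by rw [← he]; exact hw)
        simp [hne]
      simp [hz]
    · have hne : ¬ y = x := fun he => hy (by rw [he]; exact h)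
      simp [hne, ih hnd' h]

-- sum of multiplicities over a nodup superset of the support is the length
lemma cfa_count_sum (m d : List String) (hnd : d.Nodup) (hsub : ∀ x ∈ m, x ∈ d) :
    (d.map (fun w => ((m.count w : Nat) : Int))).sum = (m.length : Int) := by
  induction m with
  | nil => simp
  | cons x m ih =>
    have hx : x ∈ d := hsub x List.mem_cons_self
    have hm : ∀ y ∈ m, y ∈ d := fun y hy => hsub y (List.mem_cons_of_mem _ hy)
    have hpt : (d.map (fun w => (((x :: m).count w : Nat) : Int)))
        = d.map (fun w => ((m.count w : Nat) : Int) + (if w = x then (1 : Int) else 0)) := by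
      apply List.map_congr_left
      intro w _
      by_cases h : w = x
      · simp [h]
      · simp [List.count_cons, h]
        exact fun he => h (Eq.symm he)
    rw [hpt, PySem.List.sum_map_add_int, ih hm, cfa_ind_sum d x hnd hx, List.length_cons]
    push_cast
    ring

-- the signed candidate sum over one side equals A's countP for that side
lemma cfa_side_sum (text : String) (l d : List String) (hnd : d.Nodup)
    (hsub : ∀ x ∈ l, x ∈ d) :
    ((d.filter (fun w => PySem.Str.isIn w text)).map (fun w => ((l.count w : Nat) : Int))).sum
      = ((l.countP (fun w => PySem.Str.isIn w text) : Nat) : Int) := by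
  have hmap : (d.filter (fun w => PySem.Str.isIn w text)).map (fun w => ((l.count w : Nat) : Int))
      = (d.filter (fun w => PySem.Str.isIn w text)).map
          (fun w => (((l.filter (fun w => PySem.Str.isIn w text)).count w : Nat) : Int)) := by
    apply List.map_congr_left
    intro w hw
    have hq := (List.mem_filter.mp hw).2
    rw [List.count_filter (p := fun w => PySem.Str.isIn w text) hq]
  rw [hmap, cfa_count_sum]
  · rw [List.countP_eq_length_filter]
  · exact hnd.filter _
  · intro x hxm
    rcases List.mem_filter.mp hxm with ⟨hxl, hq⟩
    exact List.mem_filter.mpr ⟨hsub x hxl, hq⟩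

-- difference of sums
lemma cfa_sum_sub (d : List String) (f g : String → Int) :
    (d.map (fun w => f w - g w)).sum = (d.map f).sum - (d.map g).sum := by
  induction d with
  | nil => simp
  | cons x d ih => simp [ih]; ring

-- ===== VERDICT (by name: the statement is the Claim_ definition above) =====
theorem check_factual_accuracy_spec : Claim_equal_check_factual_accuracy := by
  intro gr ca ia _
  unfold Spec_check_factual_accuracy check_factual_accuracy check_factual_accuracy_alt
  simp only [cfa_score_eq, zero_add]
  set text := PySem.Str.strip (PySem.Str.lower gr) with htext
  set cw := cfaLongWords ca with hcw
  set iw := cfaLongWords ia with hiw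
  set d := PySem.List.dedup (cw ++ iw) with hd
  have hnd : d.Nodup := PySem.List.nodup_dedup _
  have hsubc : ∀ x ∈ cw, x ∈ d := by
    intro x hx
    rw [hd, PySem.List.mem_dedup]
    exact List.mem_append_left _ hx
  have hsubi : ∀ x ∈ iw, x ∈ d := by
    intro x hx
    rw [hd, PySem.List.mem_dedup]
    exact List.mem_append_right _ hx
  rw [cfa_sum_sub, cfa_side_sum text cw d hnd hsubc, cfa_side_sum text iw d hnd hsubi]
  rw [decide_eq_decide]
  omega
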